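-- pv_equiv track=rewrite | github.com/KaloyanTs/RiMa | annotate.py | build_syllables_from_boundaries
-- ===== SOURCE A (Python) =====
-- from typing import Dict, List, Optional, Tuple
--
-- def build_syllables_from_boundaries(word: str, boundaries: List[bool]) -> str:
--     letters = list(word)
--     out = []
--     for i, ch in enumerate(letters):
--         out.append(ch)
--         if i < len(letters) - 1 and boundaries[i]:
--             out.append("-")
--     return "".join(out)
-- ===== SOURCE B (Python) =====
-- def build_syllables_from_boundaries(word, boundaries):
--     parts = []
--     start = 0
--     for i in range(len(word) - 1):
--         if boundaries[i]:
--             parts.append(word[start:i + 1])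
--             start = i + 1
--     parts.append(word[start:])
--     return "-".join(parts)
-- ===== Notes on version B (the rewrite author's own statement) =====
-- stated objective: simpler
-- what changed: B slices the word into syllable segments at the flagged boundaries and lets '-'.join insert the hyphens, instead of A's char-by-char emission with a conditional hyphen append.
import Mathlib
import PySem

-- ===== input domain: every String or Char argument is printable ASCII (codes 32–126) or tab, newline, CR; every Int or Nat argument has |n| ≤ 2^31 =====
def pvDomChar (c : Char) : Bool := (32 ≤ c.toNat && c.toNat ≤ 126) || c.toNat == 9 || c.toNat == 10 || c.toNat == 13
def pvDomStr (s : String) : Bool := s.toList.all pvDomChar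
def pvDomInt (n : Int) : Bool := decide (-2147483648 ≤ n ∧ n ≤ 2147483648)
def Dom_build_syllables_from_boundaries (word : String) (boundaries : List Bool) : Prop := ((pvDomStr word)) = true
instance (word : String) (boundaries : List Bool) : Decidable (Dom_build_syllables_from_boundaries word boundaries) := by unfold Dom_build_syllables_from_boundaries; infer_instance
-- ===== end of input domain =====

-- B slices the word into syllable segments at the flagged boundaries and lets '-'.join insert the
-- hyphens, instead of A's char-by-char emission with a conditional hyphen append (objective: simpler).

-- ===== PORT A =====
def build_syllables_from_boundaries (word : String) (boundaries : List Bool) : String :=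
  let letters := word.toList
  -- boundaries[i] is only read when i < len(letters) - 1; Pre_ guarantees it is in range,
  -- so pyGetD's default is never taken on admitted inputs.
  let out : List Char := (PySem.List.enumerate letters 0).foldl
    (fun acc p =>
      let acc := acc ++ [p.2]
      if p.1 < (letters.length : Int) - 1 ∧ PySem.List.pyGetD boundaries p.1 false = true then
        acc ++ ['-']
      else acc)
    []
  String.ofList out

-- ===== PORT B =====
def build_syllables_from_boundaries_alt (word : String) (boundaries : List Bool) : String :=
  let letters := word.toList
  let s := (PySem.List.pyRange 0 ((letters.length : Int) - 1) 1).foldl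
    (fun (s : List String × Int) i =>
      if PySem.List.pyGetD boundaries i false then
        (s.1 ++ [String.ofList (PySem.List.slice letters (some s.2) (some (i + 1)))], i + 1)
      else s)
    ([], 0)
  PySem.Str.join "-" (s.1 ++ [String.ofList (PySem.List.slice letters (some s.2) none)])

-- ===== PRECONDITION & SPEC =====
-- Pre_ excludes exactly the inputs where Python A raises IndexError: boundaries shorter than len(word)-1.
def Pre_build_syllables_from_boundaries (word : String) (boundaries : List Bool) : Prop :=
  word.toList.length ≤ boundaries.length + 1
instance (word : String) (boundaries : List Bool) : Decidable (Pre_build_syllables_from_boundaries word boundaries) := by unfold Pre_build_syllables_from_boundaries; infer_instance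
def pvWitness_build_syllables_from_boundaries : String × List Bool := ("aba", [true, false])

def Spec_build_syllables_from_boundaries (word : String) (boundaries : List Bool) (out : String) : Prop := out = build_syllables_from_boundaries_alt word boundaries
instance (word : String) (boundaries : List Bool) (out : String) : Decidable (Spec_build_syllables_from_boundaries word boundaries out) := by unfold Spec_build_syllables_from_boundaries; infer_instance

-- ===== CLAIM (what is proved, stated in full; the proofs are below) =====
def Claim_equal_build_syllables_from_boundaries : Prop := ∀ (word : String) (boundaries : List Bool), Dom_build_syllables_from_boundaries word boundaries → Pre_build_syllables_from_boundaries word boundaries → Spec_build_syllables_from_boundaries word boundaries (build_syllables_from_boundaries word boundaries)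

-- ===== LEMMAS AND PROOFS =====

/-- Common specification: the hyphenated character stream. -/
def pvEmit : List Bool → List Char → List Char
  | _, [] => []
  | _, [c] => [c]
  | [], c :: cs => c :: pvEmit [] cs
  | b :: bs, c :: cs => c :: (if b then '-' :: pvEmit bs cs else pvEmit bs cs)

theorem pvEmit_nil (bs : List Bool) : pvEmit bs [] = [] := by cases bs <;> rfl

theorem pvEmit_single (bs : List Bool) (c : Char) : pvEmit bs [c] = [c] := by cases bs <;> rfl

theorem pvEmit_cons_nil (c : Char) (cs : List Char) (h : cs ≠ []) :
    pvEmit [] (c :: cs) = c :: pvEmit [] cs := by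
  cases cs with
  | nil => exact absurd rfl h
  | cons d ds => rfl

theorem pvEmit_cons_cons (b : Bool) (bs : List Bool) (c : Char) (cs : List Char) (h : cs ≠ []) :
    pvEmit (b :: bs) (c :: cs) = c :: (if b then '-' :: pvEmit bs cs else pvEmit bs cs) := by
  cases cs with
  | nil => exact absurd rfl h
  | cons d ds => rfl

theorem pv_getD_drop_nil {bs : List Bool} {j : Nat} (h : bs.drop j = []) :
    bs[j]?.getD false = false := by
  have hle : bs.length ≤ j := by
    by_contra hlt
    exact absurd h (by simp [List.drop_eq_nil_iff]; omega)
  simp [List.getElem?_eq_none (by omega)]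

theorem pv_getD_drop_cons {bs : List Bool} {j : Nat} {b : Bool} {rest : List Bool}
    (h : bs.drop j = b :: rest) : bs[j]?.getD false = b := by
  have h0 : bs[j]? = some b := by
    have h1 : (bs.drop j)[0]? = bs[j + 0]? := List.getElem?_drop
    simp [h] at h1; exact h1.symm
  simp [h0]

theorem pv_drop_succ_of_drop {bs : List Bool} {j : Nat} {b : Bool} {rest : List Bool}
    (h : bs.drop j = b :: rest) : bs.drop (j + 1) = rest := by
  have : bs.drop (j + 1) = (bs.drop j).drop 1 := by
    rw [List.drop_drop]
  simp [this, h]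

theorem pv_drop_succ_nil {bs : List Bool} {j : Nat} (h : bs.drop j = []) :
    bs.drop (j + 1) = [] := by
  have : bs.drop (j + 1) = (bs.drop j).drop 1 := by rw [List.drop_drop]
  simp [this, h]


theorem pv_chars_join (s : List Char) (parts : List (List Char)) (last : List Char) :
    PySem.Chars.join s (parts ++ [last]) = parts.flatMap (fun p => p ++ s) ++ last := by
  induction parts with
  | nil => simp [PySem.Chars.join_singleton]
  | cons p ps ih =>
    cases ps with
    | nil => simp [PySem.Chars.join_cons_cons, PySem.Chars.join_singleton]
    | cons q qs => simp_all [PySem.Chars.join_cons_cons]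

theorem pv_join_parts (parts : List String) (last : String) :
    (PySem.Str.join "-" (parts ++ [last])).toList
      = (parts.map String.toList).flatMap (fun p => p ++ ['-']) ++ last.toList := by
  rw [PySem.Str.toList_join]
  have hs : ("-" : String).toList = ['-'] := rfl
  simp [hs, pv_chars_join]

/-- A's fold over the enumerated suffix yields `pvEmit` of the matching suffixes. -/
theorem pv_foldA (m : Int) (bs : List Bool) :
    ∀ (cs : List Char) (j : Nat) (acc : List Char),
      (j : Int) + cs.length = m →
      ((PySem.List.enumerate cs (j : Int)).foldl
        (fun acc p =>
          let acc := acc ++ [p.2]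
          if p.1 < m - 1 ∧ PySem.List.pyGetD bs p.1 false = true then acc ++ ['-'] else acc)
        acc)
      = acc ++ pvEmit (bs.drop j) cs := by
  intro cs
  induction cs with
  | nil => intro j acc _; simp [PySem.List.enumerate_nil, pvEmit_nil]
  | cons c cs ih =>
    intro j acc hm
    rw [PySem.List.enumerate_cons]
    have hcast : (j : Int) + 1 = ((j + 1 : Nat) : Int) := by push_cast; ring
    simp only [List.foldl_cons, hcast]
    rw [ih (j + 1) _ (by simp at hm ⊢; push_cast at hm ⊢; omega)]
    cases cs with
    | nil =>
      have hj : ¬ ((j : Int) < m - 1) := by simp at hm; omega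
      simp [hj, pvEmit_nil, pvEmit_single]
    | cons d ds =>
      have hj : (j : Int) < m - 1 := by simp at hm; push_cast at hm; omega
      rw [PySem.List.pyGetD_natCast]
      rcases hdrop : bs.drop j with _ | ⟨b, rest⟩
      · have hb : bs[j]?.getD false = false := pv_getD_drop_nil hdrop
        have hds : bs.drop (j + 1) = [] := pv_drop_succ_nil hdrop
        rw [hds]
        simp [hb, hj, pvEmit_cons_nil c (d :: ds) (by simp)]
      · have hb : bs[j]?.getD false = b := pv_getD_drop_cons hdrop
        have hds : bs.drop (j + 1) = rest := pv_drop_succ_of_drop hdrop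
        rw [hds, pvEmit_cons_cons b rest c (d :: ds) (by simp)]
        cases b with
        | false => simp [hb, hj]
        | true => simp [hb, hj]

/-- B's loop invariant. -/
theorem pv_foldB (letters : List Char) (bs : List Bool) :
    ∀ (k j : Nat) (parts : List String) (start : Nat),
      j + k = letters.length - 1 → start ≤ j → 1 ≤ letters.length →
      (PySem.Str.join "-" (((PySem.List.pyRange (j : Int) ((letters.length - 1 : Nat) : Int) 1).foldl
          (fun (s : List String × Int) i =>
            if PySem.List.pyGetD bs i false then
              (s.1 ++ [String.ofList (PySem.List.slice letters (some s.2) (some (i + 1)))], i + 1)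
            else s)
          (parts, (start : Int))).1
          ++ [String.ofList (PySem.List.slice letters (some ((PySem.List.pyRange (j : Int) ((letters.length - 1 : Nat) : Int) 1).foldl
          (fun (s : List String × Int) i =>
            if PySem.List.pyGetD bs i false then
              (s.1 ++ [String.ofList (PySem.List.slice letters (some s.2) (some (i + 1)))], i + 1)
            else s)
          (parts, (start : Int))).2) none)])).toList
      = (parts.map String.toList).flatMap (fun p => p ++ ['-'])
        ++ (letters.drop start).take (j - start)
        ++ pvEmit (bs.drop j) (letters.drop j) := by
  intro k
  induction k with
  | zero =>
    intro j parts start hjk hsj hm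
    have hj : j = letters.length - 1 := by omega
    rw [PySem.List.pyRange_one_eq_nil (by subst hj; exact le_refl _)]
    simp only [List.foldl_nil]
    rw [pv_join_parts]
    simp only [PySem.List.slice_from_natCast, String.toList_ofList]
    subst hj
    rcases hlast : letters.drop (letters.length - 1) with _ | ⟨c, cs⟩
    · exact absurd (congrArg List.length hlast) (by simp; omega)
    · have hcs : cs = [] := by
        have := congrArg List.length hlast
        simp at this
        exact List.eq_nil_of_length_eq_zero (by omega)
      subst hcs
      rw [pvEmit_single, List.append_assoc]
      congr 1
      have h1 : letters.drop start
          = (letters.drop start).take (letters.length - 1 - start)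
            ++ (letters.drop start).drop (letters.length - 1 - start) := by
        rw [List.take_append_drop]
      have h2 : (letters.drop start).drop (letters.length - 1 - start)
          = letters.drop (letters.length - 1) := by
        rw [List.drop_drop]
        congr 1
        omega
      conv_lhs => rw [h1, h2, hlast]
  | succ k ih =>
    intro j parts start hjk hsj hm
    have hjlt : j < letters.length - 1 := by omega
    rw [PySem.List.pyRange_one_cons (by push_cast; omega)]
    have hcast : (j : Int) + 1 = ((j + 1 : Nat) : Int) := by push_cast; ring
    simp only [List.foldl_cons, PySem.List.pyGetD_natCast, hcast, List.getD_eq_getElem?_getD]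
    rcases hdropL : letters.drop j with _ | ⟨c, cs⟩
    · exact absurd (congrArg List.length hdropL) (by simp; omega)
    have hcs : cs = letters.drop (j + 1) := by
      have h0 : letters.drop (j + 1) = (letters.drop j).drop 1 := by rw [List.drop_drop]
      simp [h0, hdropL]
    have hcsne : cs ≠ [] := by
      have hlen := congrArg List.length hcs
      simp at hlen
      intro hn
      rw [hn] at hlen
      simp at hlen
      omega
    have hgetc : letters[j]? = some c := by
      have h1 : (letters.drop j)[0]? = letters[j + 0]? := List.getElem?_drop
      simp [hdropL] at h1
      exact h1.symm
    have htake : (letters.drop start).take (j + 1 - start)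
        = (letters.drop start).take (j - start) ++ [c] := by
      have hs1 : j + 1 - start = (j - start) + 1 := by omega
      rw [hs1, List.take_succ]
      congr 1
      have h1 : (letters.drop start)[j - start]? = letters[start + (j - start)]? :=
        List.getElem?_drop
      have h2 : start + (j - start) = j := by omega
      rw [h2] at h1
      rw [h1, hgetc]
      rfl
    rcases hdropB : bs.drop j with _ | ⟨b, rest⟩
    · have hb : bs[j]?.getD false = false := pv_getD_drop_nil hdropB
      have hrest : bs.drop (j + 1) = [] := pv_drop_succ_nil hdropB
      simp only [hb, Bool.false_eq_true, if_false]
      rw [ih (j + 1) parts start (by omega) (by omega) hm]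
      rw [pvEmit_cons_nil c cs hcsne, ← hcs, htake, hrest]
      simp
    · have hb : bs[j]?.getD false = b := pv_getD_drop_cons hdropB
      have hrest : bs.drop (j + 1) = rest := pv_drop_succ_of_drop hdropB
      rw [pvEmit_cons_cons b rest c cs hcsne]
      cases b with
      | false =>
        simp only [hb, Bool.false_eq_true, if_false]
        rw [ih (j + 1) parts start (by omega) (by omega) hm, htake, hrest, ← hcs]
        simp
      | true =>
        simp only [hb, if_true]
        rw [ih (j + 1) (parts ++ [String.ofList (PySem.List.slice letters (some (start : Int)) (some ((j + 1 : Nat) : Int)))]) (j + 1) (by omega) (by omega) hm]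
        rw [PySem.List.slice_natCast, htake, hrest, ← hcs]
        simp

theorem pv_A_eq (word : String) (bs : List Bool) :
    build_syllables_from_boundaries word bs = String.ofList (pvEmit bs word.toList) := by
  unfold build_syllables_from_boundaries
  have h := pv_foldA ((word.toList.length : Int)) bs word.toList 0 [] (by simp)
  simp only [Nat.cast_zero, List.drop_zero, List.nil_append] at h
  exact congrArg String.ofList h

theorem pv_B_eq (word : String) (bs : List Bool) :
    build_syllables_from_boundaries_alt word bs = String.ofList (pvEmit bs word.toList) := by
  unfold build_syllables_from_boundaries_alt
  by_cases h : word.toList.length = 0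
  · have hw : word.toList = [] := List.eq_nil_of_length_eq_zero h
    rw [hw, pvEmit_nil]
    rfl
  · have h1 : ((word.toList.length : Int) - 1) = ((word.toList.length - 1 : Nat) : Int) := by
      push_cast; omega
    simp only [h1]
    have hfold := pv_foldB word.toList bs (word.toList.length - 1) 0 [] 0
      (by omega) (by omega) (by omega)
    simp only [Nat.cast_zero, List.drop_zero, List.take_zero, List.map_nil,
      List.flatMap_nil, List.nil_append, Nat.sub_zero] at hfold
    refine String.toList_inj.mp ?_
    rw [String.toList_ofList]
    exact hfold

-- ===== VERDICT (by name: the statement is the Claim_ definition above) =====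
theorem build_syllables_from_boundaries_spec : Claim_equal_build_syllables_from_boundaries := by
  intro word bs _ _
  unfold Spec_build_syllables_from_boundaries
  rw [pv_A_eq, pv_B_eq]
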